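-- pv_equiv track=rewrite | github.com/saramsadev-dev/Saramsa | backend/scripts/_cleanup_registry.py | _is_feedback_duplicate
-- ===== SOURCE A (Python) =====
-- FEEDBACK_DUPLICATED_BY_INSIGHTS = {
--     "POST /api/feedback/analyze/",
--     "GET /api/feedback/task-status/",
--     "GET /api/feedback/tasks/",
--     "GET /api/feedback/tasks/stream/",
--     "GET /api/feedback/comments/",
--     "POST /api/feedback/upload/",
--     "POST /api/feedback/keywords/update/",
--     "GET /api/feedback/insights/",
--     "GET /api/feedback/insights/review/",
--     "POST /api/feedback/insights/review/update/",
--     "GET /api/feedback/insights/rules/",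
--     "POST /api/feedback/insights/rules/",
--     "POST /api/feedback/insights/rules/apply/",
--     "GET /api/feedback/insights/user-stories/",
--     "GET /api/feedback/insights/user-stories/all/",
--     "POST /api/feedback/ingestion/run-now/",
--     "GET /api/feedback/ingestion/schedule/",
--     "POST /api/feedback/ingestion/schedule/",
-- }
--
-- def _is_feedback_duplicate(method, path):
--     key = f"{method} {path}"
--     if key in FEEDBACK_DUPLICATED_BY_INSIGHTS:
--         return True
--     for dup_key in FEEDBACK_DUPLICATED_BY_INSIGHTS:
--         dup_method, dup_path = dup_key.split(" ", 1)
--         if method == dup_method and path.startswith(dup_path.rstrip("/")):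
--             return True
--     return False
-- ===== SOURCE B (Python) =====
-- # Precomputed method -> path-prefix table (each known path with trailing slashes stripped),
-- # so the lookup is one dict get plus a scan of that method's prefixes; the exact-match set
-- # test is redundant because every exact match is also a prefix match.
-- PREFIX_BY_METHOD = {
--     "POST": (
--         "/api/feedback/analyze",
--         "/api/feedback/upload",
--         "/api/feedback/keywords/update",
--         "/api/feedback/insights/review/update",
--         "/api/feedback/insights/rules",
--         "/api/feedback/insights/rules/apply",
--         "/api/feedback/ingestion/run-now",
--         "/api/feedback/ingestion/schedule",
--     ),
--     "GET": (
--         "/api/feedback/task-status",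
--         "/api/feedback/tasks",
--         "/api/feedback/tasks/stream",
--         "/api/feedback/comments",
--         "/api/feedback/insights",
--         "/api/feedback/insights/review",
--         "/api/feedback/insights/rules",
--         "/api/feedback/insights/user-stories",
--         "/api/feedback/insights/user-stories/all",
--         "/api/feedback/ingestion/schedule",
--     ),
-- }
--
-- def _is_feedback_duplicate(method, path):
--     return any(path.startswith(p) for p in PREFIX_BY_METHOD.get(method, ()))
-- ===== Notes on version B (the rewrite author's own statement) =====
-- stated objective: simpler
-- what changed: B replaces A's exact-match set test plus a per-call scan that splits all 18 'METHOD path' strings by a module-load-time dict from HTTP method to its slash-stripped path prefixes, so a call is one dict lookup plus a prefix scan over that method's entries only, and the redundant exact-match check (every exact match is also a prefix match) is dropped.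
import Mathlib
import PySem

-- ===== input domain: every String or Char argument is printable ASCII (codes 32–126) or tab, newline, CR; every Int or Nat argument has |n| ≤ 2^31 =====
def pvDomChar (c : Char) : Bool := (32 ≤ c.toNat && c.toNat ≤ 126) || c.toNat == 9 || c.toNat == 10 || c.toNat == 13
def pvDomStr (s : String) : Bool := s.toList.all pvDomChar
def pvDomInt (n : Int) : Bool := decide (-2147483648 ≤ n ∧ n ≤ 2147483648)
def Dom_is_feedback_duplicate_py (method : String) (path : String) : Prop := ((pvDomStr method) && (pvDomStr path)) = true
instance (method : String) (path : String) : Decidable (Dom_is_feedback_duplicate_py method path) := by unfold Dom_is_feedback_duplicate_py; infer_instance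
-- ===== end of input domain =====

-- B replaces A's exact-match set test + scan over all 18 "METHOD path" strings by a precomputed
-- method → path-prefix table (objective: simpler; the exact-match test is redundant since an
-- exact match is also a prefix match).

-- ===== PORT A =====
-- the module constant FEEDBACK_DUPLICATED_BY_INSIGHTS (a Python set literal, all elements distinct)
def feedbackEntries : List String := [
    "POST /api/feedback/analyze/",
    "GET /api/feedback/task-status/",
    "GET /api/feedback/tasks/",
    "GET /api/feedback/tasks/stream/",
    "GET /api/feedback/comments/",
    "POST /api/feedback/upload/",
    "POST /api/feedback/keywords/update/",
    "GET /api/feedback/insights/",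
    "GET /api/feedback/insights/review/",
    "POST /api/feedback/insights/review/update/",
    "GET /api/feedback/insights/rules/",
    "POST /api/feedback/insights/rules/",
    "POST /api/feedback/insights/rules/apply/",
    "GET /api/feedback/insights/user-stories/",
    "GET /api/feedback/insights/user-stories/all/",
    "POST /api/feedback/ingestion/run-now/",
    "GET /api/feedback/ingestion/schedule/",
    "POST /api/feedback/ingestion/schedule/"]

-- hand port of Python's s.rstrip(chars) (no PySem primitive takes a chars argument on one side):
-- drop trailing characters occurring in `chars`; exact on all strings.
def pyRstripChars (s : String) (chars : String) : String :=
  String.ofList ((s.toList.reverse.dropWhile (fun c => chars.toList.contains c)).reverse)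

-- the 'for dup_key in FEEDBACK_DUPLICATED_BY_INSIGHTS' loop with its early 'return True'
def aLoop (method path : String) : List String → Bool
  | [] => false
  | dupKey :: rest =>
    match PySem.Str.splitMax? dupKey " " 1 with
    | some [dupMethod, dupPath] =>
      if method == dupMethod && PySem.Str.startswith path (pyRstripChars dupPath "/") then true
      else aLoop method path rest
    | _ => aLoop method path rest  -- unreachable: every set element contains a space (Python would raise on unpacking)

def is_feedback_duplicate_py (method : String) (path : String) : Bool :=
  let key := method ++ " " ++ path
  if PySem.Set.contains (PySem.Set.ofList feedbackEntries) key then true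
  else aLoop method path (PySem.Set.ofList feedbackEntries)

-- ===== PORT B =====
-- the module constant PREFIX_BY_METHOD of Source B
def prefixByMethod : PySem.Dict String (List String) :=
  PySem.Dict.ofList [
    ("POST", [
      "/api/feedback/analyze",
      "/api/feedback/upload",
      "/api/feedback/keywords/update",
      "/api/feedback/insights/review/update",
      "/api/feedback/insights/rules",
      "/api/feedback/insights/rules/apply",
      "/api/feedback/ingestion/run-now",
      "/api/feedback/ingestion/schedule"]),
    ("GET", [
      "/api/feedback/task-status",
      "/api/feedback/tasks",
      "/api/feedback/tasks/stream",
      "/api/feedback/comments",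
      "/api/feedback/insights",
      "/api/feedback/insights/review",
      "/api/feedback/insights/rules",
      "/api/feedback/insights/user-stories",
      "/api/feedback/insights/user-stories/all",
      "/api/feedback/ingestion/schedule"])]

def is_feedback_duplicate_py_alt (method : String) (path : String) : Bool :=
  (PySem.Dict.getD prefixByMethod method []).any (fun p => PySem.Str.startswith path p)

-- ===== PRECONDITION & SPEC =====
def Spec_is_feedback_duplicate_py (method : String) (path : String) (out : Bool) : Prop := out = is_feedback_duplicate_py_alt method path
instance (method : String) (path : String) (out : Bool) : Decidable (Spec_is_feedback_duplicate_py method path out) := by unfold Spec_is_feedback_duplicate_py; infer_instance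

-- ===== CLAIM (what is proved, stated in full; the proofs are below) =====
def Claim_equal_is_feedback_duplicate_py : Prop := ∀ (method : String) (path : String), Dom_is_feedback_duplicate_py method path → Spec_is_feedback_duplicate_py method path (is_feedback_duplicate_py method path)

-- ===== LEMMAS AND PROOFS =====

-- splitting a one-space-separated concatenation is injective when the parts carry no space
theorem append_space_inj (m p a b : List Char) (ha : ' ' ∉ a) (hb : ' ' ∉ b)
    (h : m ++ ' ' :: p = a ++ ' ' :: b) : m = a ∧ p = b := by
  induction a generalizing m with
  | nil =>
    cases m with
    | nil => simpa using h
    | cons c m' =>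
      simp only [List.nil_append, List.cons_append, List.cons.injEq] at h
      exact absurd (h.2 ▸ (by simp : ' ' ∈ m' ++ ' ' :: p)) hb
  | cons c a' ih =>
    cases m with
    | nil =>
      simp only [List.nil_append, List.cons_append, List.cons.injEq] at h
      exact absurd (h.1 ▸ (List.mem_cons_self : c ∈ c :: a')) ha
    | cons d m' =>
      simp only [List.cons_append, List.cons.injEq] at h
      have h2 := ih m' (fun hm => ha (List.mem_cons_of_mem c hm)) h.2
      exact ⟨by rw [h.1, h2.1], h2.2⟩

theorem key_eq (m p a b : String) (ha : ' ' ∉ a.toList) (hb : ' ' ∉ b.toList)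
    (h : m ++ " " ++ p = a ++ " " ++ b) : m = a ∧ p = b := by
  have h' := congrArg String.toList h
  simp only [String.toList_append] at h'
  have hs : (" " : String).toList = [' '] := by decide
  rw [hs] at h'
  simp only [List.append_assoc, List.singleton_append] at h'
  have h2 := append_space_inj _ _ _ _ ha hb h'
  exact ⟨String.toList_inj.mp h2.1, String.toList_inj.mp h2.2⟩

-- the set elements are pairwise distinct, so set(…) keeps the literal list
theorem set_entries : PySem.Set.ofList feedbackEntries = feedbackEntries := by decide

-- an exact match "method path" ∈ the set forces method and path to be the literal parts,
-- on which the prefix loop fires as well: the membership branch of A is redundant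
set_option maxHeartbeats 4000000 in
theorem mem_loop (m p : String)
    (h : (m ++ " " ++ p) ∈ feedbackEntries) :
    aLoop m p feedbackEntries = true := by
  simp only [feedbackEntries, List.mem_cons, List.not_mem_nil, or_false] at h
  rcases h with h | h | h | h | h | h | h | h | h | h | h | h | h | h | h | h | h | h
  · obtain ⟨h1, h2⟩ := key_eq m p "POST" "/api/feedback/analyze/" (by decide) (by decide) (h.trans (by decide)); subst h1; subst h2; decide
  · obtain ⟨h1, h2⟩ := key_eq m p "GET" "/api/feedback/task-status/" (by decide) (by decide) (h.trans (by decide)); subst h1; subst h2; decide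
  · obtain ⟨h1, h2⟩ := key_eq m p "GET" "/api/feedback/tasks/" (by decide) (by decide) (h.trans (by decide)); subst h1; subst h2; decide
  · obtain ⟨h1, h2⟩ := key_eq m p "GET" "/api/feedback/tasks/stream/" (by decide) (by decide) (h.trans (by decide)); subst h1; subst h2; decide
  · obtain ⟨h1, h2⟩ := key_eq m p "GET" "/api/feedback/comments/" (by decide) (by decide) (h.trans (by decide)); subst h1; subst h2; decide
  · obtain ⟨h1, h2⟩ := key_eq m p "POST" "/api/feedback/upload/" (by decide) (by decide) (h.trans (by decide)); subst h1; subst h2; decide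
  · obtain ⟨h1, h2⟩ := key_eq m p "POST" "/api/feedback/keywords/update/" (by decide) (by decide) (h.trans (by decide)); subst h1; subst h2; decide
  · obtain ⟨h1, h2⟩ := key_eq m p "GET" "/api/feedback/insights/" (by decide) (by decide) (h.trans (by decide)); subst h1; subst h2; decide
  · obtain ⟨h1, h2⟩ := key_eq m p "GET" "/api/feedback/insights/review/" (by decide) (by decide) (h.trans (by decide)); subst h1; subst h2; decide
  · obtain ⟨h1, h2⟩ := key_eq m p "POST" "/api/feedback/insights/review/update/" (by decide) (by decide) (h.trans (by decide)); subst h1; subst h2; decide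
  · obtain ⟨h1, h2⟩ := key_eq m p "GET" "/api/feedback/insights/rules/" (by decide) (by decide) (h.trans (by decide)); subst h1; subst h2; decide
  · obtain ⟨h1, h2⟩ := key_eq m p "POST" "/api/feedback/insights/rules/" (by decide) (by decide) (h.trans (by decide)); subst h1; subst h2; decide
  · obtain ⟨h1, h2⟩ := key_eq m p "POST" "/api/feedback/insights/rules/apply/" (by decide) (by decide) (h.trans (by decide)); subst h1; subst h2; decide
  · obtain ⟨h1, h2⟩ := key_eq m p "GET" "/api/feedback/insights/user-stories/" (by decide) (by decide) (h.trans (by decide)); subst h1; subst h2; decide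
  · obtain ⟨h1, h2⟩ := key_eq m p "GET" "/api/feedback/insights/user-stories/all/" (by decide) (by decide) (h.trans (by decide)); subst h1; subst h2; decide
  · obtain ⟨h1, h2⟩ := key_eq m p "POST" "/api/feedback/ingestion/run-now/" (by decide) (by decide) (h.trans (by decide)); subst h1; subst h2; decide
  · obtain ⟨h1, h2⟩ := key_eq m p "GET" "/api/feedback/ingestion/schedule/" (by decide) (by decide) (h.trans (by decide)); subst h1; subst h2; decide
  · obtain ⟨h1, h2⟩ := key_eq m p "POST" "/api/feedback/ingestion/schedule/" (by decide) (by decide) (h.trans (by decide)); subst h1; subst h2; decide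

-- A's scan over the flat set equals B's per-method scan
set_option maxHeartbeats 2000000 in
theorem loop_eq_alt (m p : String) :
    aLoop m p feedbackEntries = is_feedback_duplicate_py_alt m p := by
  by_cases hpost : m = "POST"
  · subst hpost
    simp only [aLoop, feedbackEntries,
      (by decide : PySem.Str.splitMax? "POST /api/feedback/analyze/" " " 1 = some ["POST", "/api/feedback/analyze/"]),
      (by decide : PySem.Str.splitMax? "GET /api/feedback/task-status/" " " 1 = some ["GET", "/api/feedback/task-status/"]),
      (by decide : PySem.Str.splitMax? "GET /api/feedback/tasks/" " " 1 = some ["GET", "/api/feedback/tasks/"]),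
      (by decide : PySem.Str.splitMax? "GET /api/feedback/tasks/stream/" " " 1 = some ["GET", "/api/feedback/tasks/stream/"]),
      (by decide : PySem.Str.splitMax? "GET /api/feedback/comments/" " " 1 = some ["GET", "/api/feedback/comments/"]),
      (by decide : PySem.Str.splitMax? "POST /api/feedback/upload/" " " 1 = some ["POST", "/api/feedback/upload/"]),
      (by decide : PySem.Str.splitMax? "POST /api/feedback/keywords/update/" " " 1 = some ["POST", "/api/feedback/keywords/update/"]),
      (by decide : PySem.Str.splitMax? "GET /api/feedback/insights/" " " 1 = some ["GET", "/api/feedback/insights/"]),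
      (by decide : PySem.Str.splitMax? "GET /api/feedback/insights/review/" " " 1 = some ["GET", "/api/feedback/insights/review/"]),
      (by decide : PySem.Str.splitMax? "POST /api/feedback/insights/review/update/" " " 1 = some ["POST", "/api/feedback/insights/review/update/"]),
      (by decide : PySem.Str.splitMax? "GET /api/feedback/insights/rules/" " " 1 = some ["GET", "/api/feedback/insights/rules/"]),
      (by decide : PySem.Str.splitMax? "POST /api/feedback/insights/rules/" " " 1 = some ["POST", "/api/feedback/insights/rules/"]),
      (by decide : PySem.Str.splitMax? "POST /api/feedback/insights/rules/apply/" " " 1 = some ["POST", "/api/feedback/insights/rules/apply/"]),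
      (by decide : PySem.Str.splitMax? "GET /api/feedback/insights/user-stories/" " " 1 = some ["GET", "/api/feedback/insights/user-stories/"]),
      (by decide : PySem.Str.splitMax? "GET /api/feedback/insights/user-stories/all/" " " 1 = some ["GET", "/api/feedback/insights/user-stories/all/"]),
      (by decide : PySem.Str.splitMax? "POST /api/feedback/ingestion/run-now/" " " 1 = some ["POST", "/api/feedback/ingestion/run-now/"]),
      (by decide : PySem.Str.splitMax? "GET /api/feedback/ingestion/schedule/" " " 1 = some ["GET", "/api/feedback/ingestion/schedule/"]),
      (by decide : PySem.Str.splitMax? "POST /api/feedback/ingestion/schedule/" " " 1 = some ["POST", "/api/feedback/ingestion/schedule/"])]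
    simp [is_feedback_duplicate_py_alt,
      (by decide : PySem.Dict.getD prefixByMethod "POST" [] = [
        "/api/feedback/analyze", "/api/feedback/upload", "/api/feedback/keywords/update",
        "/api/feedback/insights/review/update", "/api/feedback/insights/rules",
        "/api/feedback/insights/rules/apply", "/api/feedback/ingestion/run-now",
        "/api/feedback/ingestion/schedule"]),
      pyRstripChars, List.any]
  · by_cases hget : m = "GET"
    · subst hget
      simp only [aLoop, feedbackEntries,
        (by decide : PySem.Str.splitMax? "POST /api/feedback/analyze/" " " 1 = some ["POST", "/api/feedback/analyze/"]),
        (by decide : PySem.Str.splitMax? "GET /api/feedback/task-status/" " " 1 = some ["GET", "/api/feedback/task-status/"]),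
        (by decide : PySem.Str.splitMax? "GET /api/feedback/tasks/" " " 1 = some ["GET", "/api/feedback/tasks/"]),
        (by decide : PySem.Str.splitMax? "GET /api/feedback/tasks/stream/" " " 1 = some ["GET", "/api/feedback/tasks/stream/"]),
        (by decide : PySem.Str.splitMax? "GET /api/feedback/comments/" " " 1 = some ["GET", "/api/feedback/comments/"]),
        (by decide : PySem.Str.splitMax? "POST /api/feedback/upload/" " " 1 = some ["POST", "/api/feedback/upload/"]),
        (by decide : PySem.Str.splitMax? "POST /api/feedback/keywords/update/" " " 1 = some ["POST", "/api/feedback/keywords/update/"]),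
        (by decide : PySem.Str.splitMax? "GET /api/feedback/insights/" " " 1 = some ["GET", "/api/feedback/insights/"]),
        (by decide : PySem.Str.splitMax? "GET /api/feedback/insights/review/" " " 1 = some ["GET", "/api/feedback/insights/review/"]),
        (by decide : PySem.Str.splitMax? "POST /api/feedback/insights/review/update/" " " 1 = some ["POST", "/api/feedback/insights/review/update/"]),
        (by decide : PySem.Str.splitMax? "GET /api/feedback/insights/rules/" " " 1 = some ["GET", "/api/feedback/insights/rules/"]),
        (by decide : PySem.Str.splitMax? "POST /api/feedback/insights/rules/" " " 1 = some ["POST", "/api/feedback/insights/rules/"]),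
        (by decide : PySem.Str.splitMax? "POST /api/feedback/insights/rules/apply/" " " 1 = some ["POST", "/api/feedback/insights/rules/apply/"]),
        (by decide : PySem.Str.splitMax? "GET /api/feedback/insights/user-stories/" " " 1 = some ["GET", "/api/feedback/insights/user-stories/"]),
        (by decide : PySem.Str.splitMax? "GET /api/feedback/insights/user-stories/all/" " " 1 = some ["GET", "/api/feedback/insights/user-stories/all/"]),
        (by decide : PySem.Str.splitMax? "POST /api/feedback/ingestion/run-now/" " " 1 = some ["POST", "/api/feedback/ingestion/run-now/"]),
        (by decide : PySem.Str.splitMax? "GET /api/feedback/ingestion/schedule/" " " 1 = some ["GET", "/api/feedback/ingestion/schedule/"]),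
        (by decide : PySem.Str.splitMax? "POST /api/feedback/ingestion/schedule/" " " 1 = some ["POST", "/api/feedback/ingestion/schedule/"])]
      simp [is_feedback_duplicate_py_alt,
        (by decide : PySem.Dict.getD prefixByMethod "GET" [] = [
          "/api/feedback/task-status", "/api/feedback/tasks", "/api/feedback/tasks/stream",
          "/api/feedback/comments", "/api/feedback/insights", "/api/feedback/insights/review",
          "/api/feedback/insights/rules", "/api/feedback/insights/user-stories",
          "/api/feedback/insights/user-stories/all", "/api/feedback/ingestion/schedule"]),
        pyRstripChars, List.any]
    · have hb1 : (m == "POST") = false := by simpa using hpost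
      have hb2 : (m == "GET") = false := by simpa using hget
      have hb1' : ("POST" == m) = false := beq_eq_false_iff_ne.mpr (fun h => hpost h.symm)
      have hb2' : ("GET" == m) = false := beq_eq_false_iff_ne.mpr (fun h => hget h.symm)
      have hgd : PySem.Dict.getD prefixByMethod m [] = [] := by
        simp [PySem.Dict.getD, PySem.Dict.get?,
          (by decide : prefixByMethod.items = [
            ("POST", [
              "/api/feedback/analyze", "/api/feedback/upload", "/api/feedback/keywords/update",
              "/api/feedback/insights/review/update", "/api/feedback/insights/rules",
              "/api/feedback/insights/rules/apply", "/api/feedback/ingestion/run-now",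
              "/api/feedback/ingestion/schedule"]),
            ("GET", [
              "/api/feedback/task-status", "/api/feedback/tasks", "/api/feedback/tasks/stream",
              "/api/feedback/comments", "/api/feedback/insights", "/api/feedback/insights/review",
              "/api/feedback/insights/rules", "/api/feedback/insights/user-stories",
              "/api/feedback/insights/user-stories/all", "/api/feedback/ingestion/schedule"])]),
          List.find?, hb1', hb2']
      simp [aLoop, feedbackEntries, is_feedback_duplicate_py_alt, hgd, hb1, hb2,
        (by decide : PySem.Str.splitMax? "POST /api/feedback/analyze/" " " 1 = some ["POST", "/api/feedback/analyze/"]),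
        (by decide : PySem.Str.splitMax? "GET /api/feedback/task-status/" " " 1 = some ["GET", "/api/feedback/task-status/"]),
        (by decide : PySem.Str.splitMax? "GET /api/feedback/tasks/" " " 1 = some ["GET", "/api/feedback/tasks/"]),
        (by decide : PySem.Str.splitMax? "GET /api/feedback/tasks/stream/" " " 1 = some ["GET", "/api/feedback/tasks/stream/"]),
        (by decide : PySem.Str.splitMax? "GET /api/feedback/comments/" " " 1 = some ["GET", "/api/feedback/comments/"]),
        (by decide : PySem.Str.splitMax? "POST /api/feedback/upload/" " " 1 = some ["POST", "/api/feedback/upload/"]),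
        (by decide : PySem.Str.splitMax? "POST /api/feedback/keywords/update/" " " 1 = some ["POST", "/api/feedback/keywords/update/"]),
        (by decide : PySem.Str.splitMax? "GET /api/feedback/insights/" " " 1 = some ["GET", "/api/feedback/insights/"]),
        (by decide : PySem.Str.splitMax? "GET /api/feedback/insights/review/" " " 1 = some ["GET", "/api/feedback/insights/review/"]),
        (by decide : PySem.Str.splitMax? "POST /api/feedback/insights/review/update/" " " 1 = some ["POST", "/api/feedback/insights/review/update/"]),
        (by decide : PySem.Str.splitMax? "GET /api/feedback/insights/rules/" " " 1 = some ["GET", "/api/feedback/insights/rules/"]),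
        (by decide : PySem.Str.splitMax? "POST /api/feedback/insights/rules/" " " 1 = some ["POST", "/api/feedback/insights/rules/"]),
        (by decide : PySem.Str.splitMax? "POST /api/feedback/insights/rules/apply/" " " 1 = some ["POST", "/api/feedback/insights/rules/apply/"]),
        (by decide : PySem.Str.splitMax? "GET /api/feedback/insights/user-stories/" " " 1 = some ["GET", "/api/feedback/insights/user-stories/"]),
        (by decide : PySem.Str.splitMax? "GET /api/feedback/insights/user-stories/all/" " " 1 = some ["GET", "/api/feedback/insights/user-stories/all/"]),
        (by decide : PySem.Str.splitMax? "POST /api/feedback/ingestion/run-now/" " " 1 = some ["POST", "/api/feedback/ingestion/run-now/"]),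
        (by decide : PySem.Str.splitMax? "GET /api/feedback/ingestion/schedule/" " " 1 = some ["GET", "/api/feedback/ingestion/schedule/"]),
        (by decide : PySem.Str.splitMax? "POST /api/feedback/ingestion/schedule/" " " 1 = some ["POST", "/api/feedback/ingestion/schedule/"])]

-- ===== VERDICT (by name: the statement is the Claim_ definition above) =====
theorem is_feedback_duplicate_py_spec : Claim_equal_is_feedback_duplicate_py := by
  intro m p _
  unfold Spec_is_feedback_duplicate_py is_feedback_duplicate_py
  rw [set_entries]
  by_cases h : (m ++ " " ++ p) ∈ feedbackEntries
  · have hc : PySem.Set.contains feedbackEntries (m ++ " " ++ p) = true := by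
      simpa [PySem.Set.contains] using h
    simp only [hc, if_true]
    exact ((loop_eq_alt m p).symm.trans (mem_loop m p h)).symm
  · have hc : PySem.Set.contains feedbackEntries (m ++ " " ++ p) = false := by
      simpa [PySem.Set.contains] using h
    simp only [hc, Bool.false_eq_true, if_false]
    exact loop_eq_alt m p
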